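-- pv_equiv track=rewrite | github.com/kurosiro2/n-gram | statistics/ngram/det_next_pairs.py | split_into_valid_segments
-- ===== SOURCE A (Python) =====
-- VALID_SHIFTS = {
--     "D", "LD", "EM", "LM", "E", "SE", "N", "SN",
--     "WR", "PH",
-- }
--
-- def split_into_valid_segments(shifts):
--     """
--     shifts: ["D","WR",...]
--     return: list[list[str]]  # VALID_SHIFTS だけからなる連続区間の列
--     """
--     segs = []
--     cur = []
--     for s in shifts:
--         if s in VALID_SHIFTS:
--             cur.append(s)
--         else:
--             # 無効シフトが来たら区切る
--             if cur:
--                 segs.append(cur)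
--                 cur = []
--     if cur:
--         segs.append(cur)
--     return segs
-- ===== SOURCE B (Python) =====
-- VALID_SHIFTS = {
--     "D", "LD", "EM", "LM", "E", "SE", "N", "SN",
--     "WR", "PH",
-- }
--
-- def split_into_valid_segments(shifts):
--     # boundary-based: find the positions of invalid shifts, then cut the list
--     # by slicing between consecutive boundaries, keeping the non-empty pieces.
--     bounds = [-1] + [i for i, s in enumerate(shifts) if s not in VALID_SHIFTS] + [len(shifts)]
--     return [shifts[a + 1:b] for a, b in zip(bounds, bounds[1:]) if b - a > 1]
-- ===== Notes on version B (the rewrite author's own statement) =====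
-- stated objective: alternative
-- what changed: Replaces A's single-pass accumulate-and-flush of a current run by a boundary-based method: one pass collects the indices of invalid shifts, then the segments are produced by slicing the list between consecutive boundaries, keeping the non-empty slices.
import Mathlib
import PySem

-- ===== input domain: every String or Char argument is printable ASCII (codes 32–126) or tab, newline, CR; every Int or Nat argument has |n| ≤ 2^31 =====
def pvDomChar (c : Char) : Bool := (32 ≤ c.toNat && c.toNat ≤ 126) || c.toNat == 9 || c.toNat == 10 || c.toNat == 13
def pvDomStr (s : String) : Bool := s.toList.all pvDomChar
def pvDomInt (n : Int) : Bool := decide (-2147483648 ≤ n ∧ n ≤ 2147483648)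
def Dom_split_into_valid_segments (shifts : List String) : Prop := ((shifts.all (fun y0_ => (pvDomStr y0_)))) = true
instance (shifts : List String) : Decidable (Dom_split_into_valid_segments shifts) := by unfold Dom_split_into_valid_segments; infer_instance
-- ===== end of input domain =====

-- B replaces A's accumulate-and-flush run collection by a boundary-based method:
-- collect the indices of invalid shifts, then slice between consecutive boundaries (alternative).

-- ===== PORT A =====
def VALID_SHIFTS : PySem.Set String :=
  PySem.Set.ofList ["D", "LD", "EM", "LM", "E", "SE", "N", "SN", "WR", "PH"]

-- the for-loop over shifts with state (segs, cur), then the final flush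
def split_into_valid_segments (shifts : List String) : List (List String) :=
  let st := shifts.foldl (fun (st : List (List String) × List String) s =>
      if PySem.Set.contains VALID_SHIFTS s then
        (st.1, st.2 ++ [s])
      else
        if st.2 ≠ [] then (st.1 ++ [st.2], []) else (st.1, []))
    ([], [])
  if st.2 ≠ [] then st.1 ++ [st.2] else st.1

-- ===== PORT B =====
-- bounds = [-1] + [i for i, s in enumerate(shifts) if s not in VALID_SHIFTS] + [len(shifts)]
-- return [shifts[a + 1:b] for a, b in zip(bounds, bounds[1:]) if b - a > 1]
def split_into_valid_segments_alt (shifts : List String) : List (List String) :=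
  let bounds : List Int :=
    [-1] ++ (PySem.List.enumerate shifts 0).filterMap
      (fun is => if ¬ PySem.Set.contains VALID_SHIFTS is.2 then some is.1 else none)
    ++ [(shifts.length : Int)]
  (bounds.zip bounds.tail).filterMap
    (fun ab => if ab.2 - ab.1 > 1 then
        some (PySem.List.slice shifts (some (ab.1 + 1)) (some ab.2)) else none)

-- ===== PRECONDITION & SPEC =====
def Spec_split_into_valid_segments (shifts : List String) (out : List (List String)) : Prop := out = split_into_valid_segments_alt shifts
instance (shifts : List String) (out : List (List String)) : Decidable (Spec_split_into_valid_segments shifts out) := by unfold Spec_split_into_valid_segments; infer_instance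

-- ===== CLAIM (what is proved, stated in full; the proofs are below) =====
def Claim_equal_split_into_valid_segments : Prop := ∀ (shifts : List String), Dom_split_into_valid_segments shifts → Spec_split_into_valid_segments shifts (split_into_valid_segments shifts)

-- ===== LEMMAS AND PROOFS =====

-- abbreviation for the membership predicate
def pvValid (s : String) : Bool := PySem.Set.contains VALID_SHIFTS s

-- the final flush of port A, as a function
def pvFin (st : List (List String) × List String) : List (List String) :=
  if st.2 ≠ [] then st.1 ++ [st.2] else st.1

-- reference segmentation with a pending run `cur`
def pvSeg : List String → List String → List (List String)
  | cur, [] => if cur = [] then [] else [cur]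
  | cur, s :: rest =>
      if pvValid s then pvSeg (cur ++ [s]) rest
      else if cur = [] then pvSeg [] rest else cur :: pvSeg [] rest

theorem pvA_fold (l : List String) (segs : List (List String)) (cur : List String) :
    pvFin (l.foldl (fun (st : List (List String) × List String) s =>
        if PySem.Set.contains VALID_SHIFTS s then (st.1, st.2 ++ [s])
        else if st.2 ≠ [] then (st.1 ++ [st.2], []) else (st.1, []))
      (segs, cur)) = segs ++ pvSeg cur l := by
  induction l generalizing segs cur with
  | nil =>
      rw [List.foldl_nil]
      unfold pvFin pvSeg
      by_cases h : cur = [] <;> simp [h]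
  | cons s t ih =>
      rw [List.foldl_cons]
      by_cases hv : PySem.Set.contains VALID_SHIFTS s = true
      · have hv' : pvValid s = true := hv
        simp only [hv, if_pos]
        rw [ih]
        simp [pvSeg, hv']
      · have hf : PySem.Set.contains VALID_SHIFTS s = false := by simpa using hv
        have hf' : pvValid s = false := hf
        by_cases hc : cur = []
        · simp only [hf, Bool.false_eq_true, if_false, hc, ne_eq, not_true_eq_false]
          rw [ih]
          simp [pvSeg, hf']
        · simp only [hf, Bool.false_eq_true, if_false, ne_eq, hc, not_false_eq_true, ite_true]
          rw [ih]
          simp [pvSeg, hf', hc]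

theorem pvA_eq_seg (shifts : List String) :
    split_into_valid_segments shifts = pvSeg [] shifts := by
  exact pvA_fold shifts [] []

theorem pvSeg_run (l : List String) (run : List String) (h : run ≠ []) :
    pvSeg run l =
      (run ++ l.takeWhile (fun t => pvValid t)) ::
        pvSeg [] (l.dropWhile (fun t => pvValid t)) := by
  induction l generalizing run with
  | nil => simp [pvSeg, h]
  | cons s t ih =>
      by_cases hv : pvValid s
      · rw [show pvSeg run (s :: t) = pvSeg (run ++ [s]) t by simp [pvSeg, hv]]
        rw [ih (run ++ [s]) (by simp)]
        simp [hv]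
      · have hf : pvValid s = false := by simpa using hv
        simp [pvSeg, hf, h]

-- the invalid-index list [i for i,s in enumerate(l, s0) if s not in VALID_SHIFTS]
def pvInv (l : List String) (s0 : Int) : List Int :=
  (PySem.List.enumerate l s0).filterMap
    (fun is => if ¬ PySem.Set.contains VALID_SHIFTS is.2 then some is.1 else none)

theorem pvInv_nil (s0 : Int) : pvInv [] s0 = [] := rfl

theorem pvInv_cons (x : String) (l : List String) (s0 : Int) :
    pvInv (x :: l) s0 =
      (if pvValid x then pvInv l (s0 + 1) else s0 :: pvInv l (s0 + 1)) := by
  unfold pvInv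
  rw [PySem.List.enumerate_cons, List.filterMap_cons]
  by_cases hv : pvValid x
  · have hm : x ∈ VALID_SHIFTS := by simpa [pvValid, PySem.Set.contains] using hv
    simp [hm, hv]
  · have hm : x ∉ VALID_SHIFTS := by simpa [pvValid, PySem.Set.contains] using hv
    simp [hm, hv]

theorem pvInv_all_valid (l : List String) (s0 : Int)
    (h : ∀ y ∈ l, pvValid y = true) : pvInv l s0 = [] := by
  induction l generalizing s0 with
  | nil => rfl
  | cons x t ih =>
      rw [pvInv_cons, if_pos (h x (by simp))]
      exact ih _ (fun y hy => h y (by simp [hy]))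

theorem pvInv_shift (l : List String) (s0 k : Int) :
    pvInv l (s0 + k) = (pvInv l s0).map (fun c => c + k) := by
  induction l generalizing s0 with
  | nil => rfl
  | cons x t ih =>
      rw [pvInv_cons, pvInv_cons]
      by_cases hv : pvValid x
      · rw [if_pos hv, if_pos hv, show s0 + k + 1 = (s0 + 1) + k by ring, ih]
      · rw [if_neg hv, if_neg hv, show s0 + k + 1 = (s0 + 1) + k by ring, ih]
        simp

theorem pvInv_lb (l : List String) (s0 : Int) : ∀ c ∈ pvInv l s0, s0 ≤ c := by
  induction l generalizing s0 with
  | nil => simp [pvInv_nil]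
  | cons x t ih =>
      intro c hc
      rw [pvInv_cons] at hc
      by_cases hv : pvValid x
      · rw [if_pos hv] at hc
        have := ih (s0 + 1) c hc; omega
      · rw [if_neg hv] at hc
        rcases List.mem_cons.mp hc with h | h
        · omega
        · have := ih (s0 + 1) c h; omega

-- processing the adjacent pairs of (a :: cs): emit the slice (a+1, b) for each pair with b - a > 1
def pvGo (shifts : List String) : Int → List Int → List (List String)
  | _, [] => []
  | a, b :: rest =>
      (if b - a > 1 then [PySem.List.slice shifts (some (a + 1)) (some b)] else []) ++
        pvGo shifts b rest

theorem pvB_go (shifts : List String) (a : Int) (rest : List Int) :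
    (((a :: rest).zip rest).filterMap
      (fun ab => if ab.2 - ab.1 > 1 then
          some (PySem.List.slice shifts (some (ab.1 + 1)) (some ab.2)) else none)) =
      pvGo shifts a rest := by
  induction rest generalizing a with
  | nil => rfl
  | cons b r ih =>
      rw [show ((a :: b :: r).zip (b :: r)) = (a, b) :: ((b :: r).zip r) by simp [List.zip]]
      rw [List.filterMap_cons, pvGo]
      by_cases h : b - a > 1
      · simp only [h, if_pos, ih]
        simp
      · simp only [h, if_neg, ih]
        simp [h]

-- slicing a shifted window of p ++ l is slicing the window of l
theorem pvSlice_shift (p l : List String) (a b : Int) (ha : 0 ≤ a) (hb : 0 ≤ b) :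
    PySem.List.slice (p ++ l) (some (a + (p.length : Int))) (some (b + (p.length : Int))) =
      PySem.List.slice l (some a) (some b) := by
  rw [PySem.List.slice_toNat _ (by omega) (by omega), PySem.List.slice_toNat _ ha hb]
  have h1 : (a + (p.length : Int)).toNat = a.toNat + p.length := by omega
  have h2 : (b + (p.length : Int)).toNat - (a + (p.length : Int)).toNat = b.toNat - a.toNat := by
    omega
  rw [h2, h1]
  congr 1
  rw [List.drop_append]
  simp

theorem pvGo_shift (p l : List String) (a : Int) (cs : List Int)
    (ha : -1 ≤ a) (hcs : ∀ c ∈ cs, 0 ≤ c) :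
    pvGo (p ++ l) (a + (p.length : Int)) (cs.map (fun c => c + (p.length : Int))) =
      pvGo l a cs := by
  induction cs generalizing a with
  | nil => rfl
  | cons b r ih =>
      rw [List.map_cons, pvGo, pvGo]
      have hb : (0:Int) ≤ b := hcs b (by simp)
      have hcond : (b + (p.length : Int) - (a + (p.length : Int)) > 1) ↔ (b - a > 1) := by omega
      have hslice : PySem.List.slice (p ++ l) (some (a + (p.length : Int) + 1)) (some (b + (p.length : Int))) =
          PySem.List.slice l (some (a + 1)) (some b) := by
        rw [show a + (p.length : Int) + 1 = (a + 1) + (p.length : Int) by ring]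
        exact pvSlice_shift p l (a + 1) b (by omega) hb
      by_cases h : b - a > 1
      · rw [if_pos (hcond.mpr h), if_pos h, hslice,
            ih b (by omega) (fun c hc => hcs c (by simp [hc]))]
      · rw [if_neg (by omega), if_neg h,
            ih b (by omega) (fun c hc => hcs c (by simp [hc]))]

theorem pvSeg_split (v : List String) (x : String) (t : List String)
    (hv : ∀ y ∈ v, pvValid y = true) (hx : pvValid x = false) :
    pvSeg [] (v ++ x :: t) = (if v = [] then [] else [v]) ++ pvSeg [] t := by
  cases v with
  | nil => simp [pvSeg, hx]
  | cons h v' =>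
      have hh : pvValid h = true := hv h (by simp)
      rw [show ((h :: v') ++ x :: t) = h :: (v' ++ x :: t) by simp]
      rw [show pvSeg [] (h :: (v' ++ x :: t)) = pvSeg ([] ++ [h]) (v' ++ x :: t) by
        simp [pvSeg, hh]]
      rw [List.nil_append, pvSeg_run _ [h] (by simp)]
      have htw : (v' ++ x :: t).takeWhile (fun t => pvValid t) = v' := by
        rw [List.takeWhile_append]
        have hv' : (v').takeWhile (fun t => pvValid t) = v' :=
          List.takeWhile_eq_self_iff.mpr (fun y hy => hv y (by simp [hy]))
        simp [hv', List.takeWhile_cons, hx]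
      have hdw : (v' ++ x :: t).dropWhile (fun t => pvValid t) = x :: t := by
        rw [List.dropWhile_append]
        have hv' : (v').dropWhile (fun t => pvValid t) = [] :=
          List.dropWhile_eq_nil_iff.mpr (fun y hy => by simp [hv y (by simp [hy])])
        simp [hv', List.dropWhile_cons, hx]
      rw [htw, hdw]
      rw [show pvSeg [] (x :: t) = pvSeg [] t by simp [pvSeg, hx]]
      simp

-- main B lemma: boundary slicing computes the reference segmentation
theorem pvInv_valid_prefix (v r : List String) (s0 : Int)
    (hv : ∀ y ∈ v, pvValid y = true) :
    pvInv (v ++ r) s0 = pvInv r (s0 + (v.length : Int)) := by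
  induction v generalizing s0 with
  | nil => simp
  | cons h v' ih =>
      rw [List.cons_append, pvInv_cons, if_pos (hv h (by simp)),
          ih (s0 + 1) (fun y hy => hv y (by simp [hy]))]
      congr 1
      simp only [List.length_cons]
      push_cast
      ring

-- main B lemma: boundary slicing computes the reference segmentation
theorem pvB_main (n : Nat) (shifts : List String) (hn : shifts.length = n) :
    pvGo shifts (-1) (pvInv shifts 0 ++ [(shifts.length : Int)]) = pvSeg [] shifts := by
  induction n using Nat.strong_induction_on generalizing shifts with
  | _ n ih =>
    rcases hdw : shifts.dropWhile (fun t => pvValid t) with _ | ⟨x, t⟩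
    · -- all shifts valid: a single segment (or none, if shifts is empty)
      have hall : ∀ y ∈ shifts, pvValid y = true := by
        have := List.dropWhile_eq_nil_iff.mp hdw
        intro y hy; simpa using this y hy
      rw [pvInv_all_valid _ _ hall, List.nil_append, pvGo, pvGo, List.append_nil]
      cases shifts with
      | nil => simp [pvSeg]
      | cons h tl =>
          have hh : pvValid h = true := hall h (by simp)
          rw [if_pos (by simp only [List.length_cons]; push_cast; omega)]
          have hsl : PySem.List.slice (h :: tl) (some ((-1:Int) + 1))
              (some (((h :: tl).length : Int))) = h :: tl := by
            rw [show ((-1:Int) + 1) = (((0:Nat)):Int) by norm_num, PySem.List.slice_natCast]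
            simp
          rw [hsl, show pvSeg [] (h :: tl) = pvSeg ([] ++ [h]) tl by simp [pvSeg, hh],
              List.nil_append, pvSeg_run _ [h] (by simp)]
          have h1 : tl.takeWhile (fun t => pvValid t) = tl :=
            List.takeWhile_eq_self_iff.mpr (fun y hy => by simp [hall y (by simp [hy])])
          have h2 : tl.dropWhile (fun t => pvValid t) = [] :=
            List.dropWhile_eq_nil_iff.mpr (fun y hy => by simp [hall y (by simp [hy])])
          rw [h1, h2]
          simp [pvSeg]
    · -- shifts = v ++ x :: t with v all valid and x invalid
      have hsh : shifts = shifts.takeWhile (fun t => pvValid t) ++ x :: t := by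
        conv_lhs => rw [← List.takeWhile_append_dropWhile (p := fun t => pvValid t) (l := shifts)]
        rw [hdw]
      set v := shifts.takeWhile (fun t => pvValid t) with hv
      have hvall : ∀ y ∈ v, pvValid y = true := fun y hy => List.mem_takeWhile_imp hy
      have hx : pvValid x = false := by
        have h0 := List.head?_dropWhile_not (fun t => pvValid t) shifts
        rw [hdw] at h0
        simpa using h0
      have hlen : shifts.length = v.length + 1 + t.length := by
        rw [hsh]; simp; omega
      have hinv : pvInv shifts 0 =
          (v.length : Int) :: (pvInv t 0).map (fun c => c + ((v.length : Int) + 1)) := by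
        rw [hsh, pvInv_valid_prefix _ _ _ hvall, pvInv_cons, if_neg (by simp [hx])]
        congr 1
        · omega
        · rw [show (0:Int) + (v.length : Int) + 1 = 0 + ((v.length : Int) + 1) by ring,
              pvInv_shift]
      rw [hinv, List.cons_append, pvGo]
      have hsl : PySem.List.slice shifts (some ((-1:Int) + 1)) (some ((v.length : Int))) = v := by
        rw [show ((-1:Int) + 1) = (((0:Nat)):Int) by norm_num, PySem.List.slice_natCast]
        rw [hsh]
        simp [List.take_append]
      rw [hsl]
      have htail : pvGo shifts (v.length : Int)
          ((pvInv t 0).map (fun c => c + ((v.length : Int) + 1)) ++ [(shifts.length : Int)]) =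
          pvSeg [] t := by
        have hk : ((v ++ [x]).length : Int) = (v.length : Int) + 1 := by simp
        have hmap : (pvInv t 0).map (fun c => c + ((v.length : Int) + 1)) ++
              [(shifts.length : Int)] =
            (pvInv t 0 ++ [(t.length : Int)]).map (fun c => c + (((v ++ [x]).length : Int))) := by
          rw [List.map_append, hk]
          congr 1
          simp only [List.map_cons, List.map_nil]
          congr 1
          rw [hlen]; push_cast; ring
        have hsh' : shifts = (v ++ [x]) ++ t := by rw [hsh]; simp
        have ha : (v.length : Int) = -1 + ((v ++ [x]).length : Int) := by rw [hk]; ring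
        rw [hmap, hsh', ha, pvGo_shift (v ++ [x]) t (-1) _ (by norm_num)
            (fun c hc => by
              rcases List.mem_append.mp hc with h | h
              · exact le_trans (by norm_num) (pvInv_lb t 0 c h)
              · simp at h; omega)]
        exact ih t.length (by omega) t rfl
      rw [htail, hsh, pvSeg_split v x t hvall hx]
      by_cases hve : v = []
      · rw [if_pos hve, hve]
        norm_num
      · rw [if_neg hve, if_pos (by
          have : 0 < v.length := List.length_pos_iff.mpr hve
          push_cast; omega)]

theorem pvB_eq_seg (shifts : List String) :
    split_into_valid_segments_alt shifts = pvSeg [] shifts := by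
  have h : split_into_valid_segments_alt shifts =
      ((((-1 : Int) :: (pvInv shifts 0 ++ [(shifts.length : Int)])).zip
          (pvInv shifts 0 ++ [(shifts.length : Int)])).filterMap
        (fun ab => if ab.2 - ab.1 > 1 then
            some (PySem.List.slice shifts (some (ab.1 + 1)) (some ab.2)) else none)) := rfl
  rw [h, pvB_go]
  exact pvB_main shifts.length shifts rfl

-- ===== VERDICT (by name: the statement is the Claim_ definition above) =====
theorem split_into_valid_segments_spec : Claim_equal_split_into_valid_segments := by
  intro shifts _
  unfold Spec_split_into_valid_segments
  rw [pvA_eq_seg, pvB_eq_seg]
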